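-- pv_equiv track=rewrite | github.com/KrishnanN27/dp_dummy | main.py | T_dp_with_traceback
-- ===== SOURCE A (Python) =====
-- def T_dp_with_traceback(segment_lengths):
--     n = len(segment_lengths)
--     prefix_sum = [0]
--     dp = [[(0, '') for _ in range(n)] for _ in range(n)]
--
--     # Initialize prefix sum and diagonal of DP table
--     for i, length in enumerate(segment_lengths):
--         prefix_sum.append(prefix_sum[-1] + length)
--         dp[i][i] = (length, '')  # No direction on single segments
--
--     # Fill the DP table
--     for length in range(2, n + 1):
--         for i in range(n - length + 1):
--             j = i + length - 1
--             total_length = prefix_sum[j + 1] - prefix_sum[i]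
--
--             # Calculate values from left and right
--             left_value = total_length - dp[i + 1][j][0]
--             right_value = total_length - dp[i][j - 1][0]
--
--             # Tie-breaking rule: prefer the left segment if equal
--             if left_value >= right_value:
--                 dp[i][j] = (left_value, 'L')
--             else:
--                 dp[i][j] = (right_value, 'R')
--
--     # Traceback to find the sequence of picks
--     sequence = []
--     i, j = 0, n - 1
--     while i != j:
--         if dp[i][j][1] == 'L':
--             sequence.append(i + 1)
--             i += 1
--         else:
--             sequence.append(j + 1)
--             j -= 1
--     sequence.append(i + 1)  # add the last segment
--
--     max_length = dp[0][n - 1][0]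
--     return max_length, sequence
-- ===== SOURCE B (Python) =====
-- def T_dp_with_traceback(segment_lengths):
--     # Top-down memoized recursion (demand-driven) instead of A's bottom-up
--     # n x n table fill; the pick sequence is also built recursively.
--     n = len(segment_lengths)
--     prefix = [0]
--     for x in segment_lengths:
--         prefix.append(prefix[-1] + x)
--     memo = {}
--
--     def solve(i, j):
--         if i == j:
--             return (segment_lengths[i], '')
--         r = memo.get((i, j))
--         if r is not None:
--             return r
--         total = prefix[j + 1] - prefix[i]
--         left = total - solve(i + 1, j)[0]
--         right = total - solve(i, j - 1)[0]
--         r = (left, 'L') if left >= right else (right, 'R')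
--         memo[(i, j)] = r
--         return r
--
--     best = solve(0, n - 1)
--
--     def trace(i, j):
--         if i == j:
--             return [i + 1]
--         if solve(i, j)[1] == 'L':
--             return [i + 1] + trace(i + 1, j)
--         return [j + 1] + trace(i, j - 1)
--
--     return best[0], trace(0, n - 1)
-- ===== Notes on version B (the rewrite author's own statement) =====
-- stated objective: alternative
-- what changed: Replaces A's bottom-up fill of a preallocated n-by-n table (iterating spans then starting indices) plus an iterative while-loop traceback with demand-driven top-down recursion: a solve(i,j) function memoized in a dict keyed by (i,j), and a recursive trace(i,j) that builds the pick sequence by consing onto recursive calls.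
import Mathlib
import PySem

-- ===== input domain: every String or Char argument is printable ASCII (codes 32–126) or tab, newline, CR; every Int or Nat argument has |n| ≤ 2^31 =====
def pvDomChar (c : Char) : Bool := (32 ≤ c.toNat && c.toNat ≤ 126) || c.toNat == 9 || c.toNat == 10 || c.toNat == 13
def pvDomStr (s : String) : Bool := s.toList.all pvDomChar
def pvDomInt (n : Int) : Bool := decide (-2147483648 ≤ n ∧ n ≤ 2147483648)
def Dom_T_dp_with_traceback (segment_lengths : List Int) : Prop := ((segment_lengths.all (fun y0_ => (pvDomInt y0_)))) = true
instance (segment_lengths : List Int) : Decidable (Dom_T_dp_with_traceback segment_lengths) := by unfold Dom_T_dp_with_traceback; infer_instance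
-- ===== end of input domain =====

-- B replaces A's bottom-up n×n table fill and while-loop traceback with top-down
-- memoized recursion (dict keyed by (i,j)) and a recursive sequence builder;
-- same results, no speed claim.

-- ===== PORT A =====
-- dp[i][j] read / write on the n×n list-of-lists table; all Python indices here are
-- nonnegative and in range, so List.getD / List.set are exact.
def pvMget (dp : List (List (Int × String))) (i j : Nat) : Int × String :=
  (dp.getD i []).getD j (0, "")

def pvMset (dp : List (List (Int × String))) (i j : Nat) (v : Int × String) :
    List (List (Int × String)) :=
  dp.set i ((dp.getD i []).set j v)

-- the traceback while-loop of A; it terminates since the gap j - i shrinks.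
-- The `else []` branch is only the totality guard for i > j (Python raises there; excluded by Pre_).
def pvTraceA (dp : List (List (Int × String))) (i j : Nat) : List Int :=
  if i = j then [(i : Int) + 1]
  else if _h : i < j then
    if (pvMget dp i j).2 = "L" then ((i : Int) + 1) :: pvTraceA dp (i + 1) j
    else ((j : Int) + 1) :: pvTraceA dp i (j - 1)
  else []
termination_by j - i
decreasing_by all_goals omega

def T_dp_with_traceback (segment_lengths : List Int) : Int × List Int :=
  let n := segment_lengths.length
  -- dp = [[(0, '') for _ in range(n)] for _ in range(n)]
  let dp0 : List (List (Int × String)) := List.replicate n (List.replicate n ((0 : Int), ""))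
  -- for i, length in enumerate(segment_lengths): prefix_sum.append(prefix_sum[-1] + length); dp[i][i] = (length, '')
  -- (enumerate indices start at 0, so p.1.toNat is exact)
  let st := (PySem.List.enumerate segment_lengths 0).foldl
      (fun (st : List Int × List (List (Int × String))) p =>
        (st.1 ++ [PySem.List.pyGetD st.1 (-1) 0 + p.2],
         pvMset st.2 p.1.toNat p.1.toNat (p.2, ""))) ([0], dp0)
  let prefix_sum := st.1
  let dp1 := st.2
  -- for length in range(2, n + 1): for i in range(n - length + 1): …
  -- (range(2, n+1) = List.range' 2 (n-1): exact for every n ≥ 0)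
  let dp2 := (List.range' 2 (n - 1)).foldl (fun dp length =>
      (List.range (n - length + 1)).foldl (fun dp i =>
        let j := i + length - 1
        let total := prefix_sum.getD (j + 1) 0 - prefix_sum.getD i 0
        let l := total - (pvMget dp (i + 1) j).1
        let r := total - (pvMget dp i (j - 1)).1
        if l ≥ r then pvMset dp i j (l, "L") else pvMset dp i j (r, "R")) dp) dp1
  ((pvMget dp2 0 (n - 1)).1, pvTraceA dp2 0 (n - 1))

-- ===== PORT B =====
-- prefix = [0]; for x in segment_lengths: prefix.append(prefix[-1] + x)
def pvPrefB (xs : List Int) : List Int :=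
  xs.foldl (fun ps x => ps ++ [PySem.List.pyGetD ps (-1) 0 + x]) [0]

-- B's memoized solve(i, j); the dict `memo` is threaded explicitly (Python mutates it).
-- All indices reached from a nonempty input satisfy i ≤ j and are in range, so
-- List.getD is exact; the `else` branch is only the totality guard for i > j
-- (Python recurses forever there; excluded by Pre_).
def pvSolveB (xs pre : List Int) (memo : PySem.Dict (Int × Int) (Int × String)) (i j : Nat) :
    (Int × String) × PySem.Dict (Int × Int) (Int × String) :=
  if i = j then ((xs.getD i 0, ""), memo)
  else if _h : i < j then
    match memo.get? ((i : Int), (j : Int)) with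
    | some r => (r, memo)
    | none =>
      let total := pre.getD (j + 1) 0 - pre.getD i 0
      let s1 := pvSolveB xs pre memo (i + 1) j
      let s2 := pvSolveB xs pre s1.2 i (j - 1)
      let left := total - s1.1.1
      let right := total - s2.1.1
      let r := if left ≥ right then (left, "L") else (right, "R")
      (r, s2.2.insert ((i : Int), (j : Int)) r)
  else ((0, ""), memo)
termination_by j - i
decreasing_by all_goals omega

-- B's recursive trace(i, j); solve is consulted again (fully memoized by then in
-- Python; here the threaded dict plays that role).
def pvTraceB (xs pre : List Int) (memo : PySem.Dict (Int × Int) (Int × String)) (i j : Nat) :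
    List Int :=
  if i = j then [(i : Int) + 1]
  else if _h : i < j then
    let s := pvSolveB xs pre memo i j
    if s.1.2 = "L" then ((i : Int) + 1) :: pvTraceB xs pre s.2 (i + 1) j
    else ((j : Int) + 1) :: pvTraceB xs pre s.2 i (j - 1)
  else []
termination_by j - i
decreasing_by all_goals omega

def T_dp_with_traceback_alt (segment_lengths : List Int) : Int × List Int :=
  let n := segment_lengths.length
  let pre := pvPrefB segment_lengths
  let s := pvSolveB segment_lengths pre PySem.Dict.empty 0 (n - 1)
  (s.1.1, pvTraceB segment_lengths pre s.2 0 (n - 1))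

-- ===== PRECONDITION & SPEC =====
-- Pre_ excludes only the empty list, on which Python A raises IndexError.
def Pre_T_dp_with_traceback (segment_lengths : List Int) : Prop := segment_lengths ≠ []
instance (segment_lengths : List Int) : Decidable (Pre_T_dp_with_traceback segment_lengths) := by
  unfold Pre_T_dp_with_traceback; infer_instance

def pvWitness_T_dp_with_traceback : List Int := [3, 1, 2]

def Spec_T_dp_with_traceback (segment_lengths : List Int) (out : Int × List Int) : Prop := out = T_dp_with_traceback_alt segment_lengths
instance (segment_lengths : List Int) (out : Int × List Int) : Decidable (Spec_T_dp_with_traceback segment_lengths out) := by unfold Spec_T_dp_with_traceback; infer_instance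

-- ===== CLAIM (what is proved, stated in full; the proofs are below) =====
def Claim_equal_T_dp_with_traceback : Prop := ∀ (segment_lengths : List Int), Dom_T_dp_with_traceback segment_lengths → Pre_T_dp_with_traceback segment_lengths → Spec_T_dp_with_traceback segment_lengths (T_dp_with_traceback segment_lengths)

-- ===== LEMMAS AND PROOFS =====

-- Reference recursion: the value/direction of the optimal play on interval (i, j)
-- (proof-only; neither port uses it).
def pvSol (xs pre : List Int) (i j : Nat) : Int × String :=
  if i = j then (xs.getD i 0, "")
  else if _h : i < j then
    let total := pre.getD (j + 1) 0 - pre.getD i 0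
    let l := total - (pvSol xs pre (i + 1) j).1
    let r := total - (pvSol xs pre i (j - 1)).1
    if l ≥ r then (l, "L") else (r, "R")
  else (0, "")
termination_by j - i
decreasing_by all_goals omega

-- table shape: n rows of length n
def pvShp (n : Nat) (dp : List (List (Int × String))) : Prop :=
  dp.length = n ∧ ∀ r ∈ dp, r.length = n

theorem pvShp_mset {n : Nat} {dp : List (List (Int × String))} (h : pvShp n dp)
    (i j : Nat) (v : Int × String) : pvShp n (pvMset dp i j v) := by
  by_cases hi : i < dp.length
  · refine ⟨by simp [pvMset, h.1], ?_⟩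
    intro r hr
    rcases List.mem_or_eq_of_mem_set hr with h' | h'
    · exact h.2 r h'
    · subst h'
      have : dp.getD i [] = dp[i] := by
        simp [List.getD_eq_getElem?_getD, List.getElem?_eq_getElem hi]
      rw [this]
      simpa using h.2 _ (List.getElem_mem hi)
  · have : pvMset dp i j v = dp := by
      simp [pvMset]
      exact List.set_eq_of_length_le (by omega)
    rw [this]; exact h

theorem pvMget_mset_self {n : Nat} {dp : List (List (Int × String))} (h : pvShp n dp)
    {i j : Nat} (hi : i < n) (hj : j < n) (v : Int × String) :
    pvMget (pvMset dp i j v) i j = v := by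
  have hi' : i < dp.length := by rw [h.1]; exact hi
  have hrow : dp.getD i [] = dp[i] := by
    simp [List.getD_eq_getElem?_getD, List.getElem?_eq_getElem hi']
  have hjlen : j < (dp.getD i []).length := by
    rw [hrow, h.2 _ (List.getElem_mem hi')]; exact hj
  unfold pvMget pvMset
  have h1 : (dp.set i ((dp.getD i []).set j v)).getD i [] = (dp.getD i []).set j v := by
    rw [List.getD_eq_getElem?_getD, List.getElem?_set_self hi', Option.getD_some]
  rw [h1, List.getD_eq_getElem?_getD, List.getElem?_set_self hjlen, Option.getD_some]

theorem pvMget_mset_ne {dp : List (List (Int × String))} {i j i' j' : Nat}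
    (hne : i' ≠ i ∨ j' ≠ j) (v : Int × String) :
    pvMget (pvMset dp i j v) i' j' = pvMget dp i' j' := by
  rcases hne with hne | hne
  · simp [pvMget, pvMset, List.getD_eq_getElem?_getD, List.getElem?_set_ne (Ne.symm hne)]
  · by_cases hii : i' = i
    · subst hii
      by_cases hi : i' < dp.length
      · simp [pvMget, pvMset, List.getD_eq_getElem?_getD, List.getElem?_set_self hi,
          List.getElem?_set_ne (Ne.symm hne)]
      · simp [pvMget, pvMset, List.getD_eq_getElem?_getD,
          List.set_eq_of_length_le (by omega : dp.length ≤ i')]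
    · simp [pvMget, pvMset, List.getD_eq_getElem?_getD, List.getElem?_set_ne (Ne.symm hii)]

-- A's first loop, prefix component: it is exactly B's prefix fold
theorem pvFold1_fst (xs : List Int) (s : Int) (ps : List Int)
    (dp : List (List (Int × String))) :
    ((PySem.List.enumerate xs s).foldl
      (fun (st : List Int × List (List (Int × String))) p =>
        (st.1 ++ [PySem.List.pyGetD st.1 (-1) 0 + p.2],
         pvMset st.2 p.1.toNat p.1.toNat (p.2, ""))) (ps, dp)).1
    = xs.foldl (fun ps x => ps ++ [PySem.List.pyGetD ps (-1) 0 + x]) ps := by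
  induction xs generalizing s ps dp with
  | nil => simp [PySem.List.enumerate_nil]
  | cons x xs ih => simp only [PySem.List.enumerate_cons, List.foldl_cons]; exact ih _ _ _

-- A's first loop, dp component: only the diagonal writes matter
theorem pvFold1_snd (xs : List Int) (s : Int) (ps : List Int)
    (dp : List (List (Int × String))) :
    ((PySem.List.enumerate xs s).foldl
      (fun (st : List Int × List (List (Int × String))) p =>
        (st.1 ++ [PySem.List.pyGetD st.1 (-1) 0 + p.2],
         pvMset st.2 p.1.toNat p.1.toNat (p.2, ""))) (ps, dp)).2
    = (PySem.List.enumerate xs s).foldl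
        (fun dp (p : Int × Int) => pvMset dp p.1.toNat p.1.toNat (p.2, "")) dp := by
  induction xs generalizing s ps dp with
  | nil => simp [PySem.List.enumerate_nil]
  | cons x xs ih => simp only [PySem.List.enumerate_cons, List.foldl_cons]; exact ih _ _ _

-- effect of the diagonal writes
theorem pvDiag (xs : List Int) (n : Nat) :
    ∀ (k : Nat) (dp : List (List (Int × String))), pvShp n dp → k + xs.length ≤ n →
    pvShp n ((PySem.List.enumerate xs (k : Int)).foldl
        (fun dp (p : Int × Int) => pvMset dp p.1.toNat p.1.toNat (p.2, "")) dp) ∧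
    ∀ i : Nat, pvMget ((PySem.List.enumerate xs (k : Int)).foldl
        (fun dp (p : Int × Int) => pvMset dp p.1.toNat p.1.toNat (p.2, "")) dp) i i
      = if k ≤ i ∧ i < k + xs.length then (xs.getD (i - k) 0, "") else pvMget dp i i := by
  induction xs with
  | nil =>
    intro k dp hshp hbound
    simp only [PySem.List.enumerate_nil, List.foldl_nil, List.length_nil, Nat.add_zero]
    refine ⟨hshp, ?_⟩
    intro i
    have h0 : ¬ (k ≤ i ∧ i < k) := by omega
    simp [h0]
  | cons x xs ih =>
    intro k dp hshp hbound
    simp only [List.length_cons] at hbound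
    have hk : k < n := by omega
    simp only [PySem.List.enumerate_cons, List.foldl_cons, Int.toNat_natCast]
    have hcast : ((k : Int) + 1) = ((k + 1 : Nat) : Int) := by push_cast; ring
    rw [hcast]
    obtain ⟨hs, hm⟩ := ih (k + 1) (pvMset dp k k (x, ""))
      (pvShp_mset hshp k k (x, "")) (by omega)
    refine ⟨hs, ?_⟩
    intro i
    rw [hm i]
    by_cases h1 : k + 1 ≤ i ∧ i < k + 1 + xs.length
    · have h2 : k ≤ i ∧ i < k + (x :: xs).length := by simp only [List.length_cons]; omega
      rw [if_pos h1, if_pos h2]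
      have h3 : i - k = (i - (k + 1)) + 1 := by omega
      rw [h3]
      simp
    · rw [if_neg h1]
      by_cases h3 : i = k
      · subst h3
        have h2 : i ≤ i ∧ i < i + (x :: xs).length := by simp only [List.length_cons]; omega
        rw [if_pos h2, pvMget_mset_self hshp hk hk]
        simp
      · rw [pvMget_mset_ne (Or.inl h3)]
        have h2 : ¬ (k ≤ i ∧ i < k + (x :: xs).length) := by
          simp only [List.length_cons]; omega
        rw [if_neg h2]

-- one write of A's fill loop, with both reads already known
theorem pvFillCell (xs pre : List Int) (S : Nat) (hS : 2 ≤ S)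
    (dp' : List (List (Int × String))) (m : Nat)
    (h1 : pvMget dp' (m + 1) (m + S - 1) = pvSol xs pre (m + 1) (m + S - 1))
    (h2 : pvMget dp' m (m + S - 1 - 1) = pvSol xs pre m (m + S - 1 - 1)) :
    (let j := m + S - 1
     let total := pre.getD (j + 1) 0 - pre.getD m 0
     let l := total - (pvMget dp' (m + 1) j).1
     let r := total - (pvMget dp' m (j - 1)).1
     if l ≥ r then pvMset dp' m j (l, "L") else pvMset dp' m j (r, "R"))
    = pvMset dp' m (m + S - 1) (pvSol xs pre m (m + S - 1)) := by
  dsimp only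
  rw [h1, h2]
  conv_rhs => rw [pvSol]
  have hne : ¬ (m = m + S - 1) := by omega
  have hlt : m < m + S - 1 := by omega
  rw [if_neg hne, dif_pos hlt]
  dsimp only
  split_ifs <;> rfl

-- one span of A's fill loop establishes the span-S cells
theorem pvFillInner_spec (xs pre : List Int) (n S : Nat) (hS : 2 ≤ S) (hSn : S ≤ n) :
    ∀ (m : Nat) (dp : List (List (Int × String))), m ≤ n - S + 1 → pvShp n dp →
    (∀ i j, i ≤ j → j < n → j + 1 - i ≤ S - 1 → pvMget dp i j = pvSol xs pre i j) →
    pvShp n ((List.range m).foldl (fun dp i =>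
        let j := i + S - 1
        let total := pre.getD (j + 1) 0 - pre.getD i 0
        let l := total - (pvMget dp (i + 1) j).1
        let r := total - (pvMget dp i (j - 1)).1
        if l ≥ r then pvMset dp i j (l, "L") else pvMset dp i j (r, "R")) dp) ∧
    ∀ i j, i ≤ j → j < n → (j + 1 - i ≤ S - 1 ∨ (j + 1 - i = S ∧ i < m)) →
      pvMget ((List.range m).foldl (fun dp i =>
        let j := i + S - 1
        let total := pre.getD (j + 1) 0 - pre.getD i 0
        let l := total - (pvMget dp (i + 1) j).1
        let r := total - (pvMget dp i (j - 1)).1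
        if l ≥ r then pvMset dp i j (l, "L") else pvMset dp i j (r, "R")) dp) i j
      = pvSol xs pre i j := by
  intro m
  induction m with
  | zero =>
    intro dp hm hshp hprev
    simp only [List.range_zero, List.foldl_nil]
    refine ⟨hshp, ?_⟩
    intro i j hij hjn hcond
    rcases hcond with h | h
    · exact hprev i j hij hjn h
    · omega
  | succ m ih =>
    intro dp hm hshp hprev
    rw [List.range_succ, List.foldl_append, List.foldl_cons, List.foldl_nil]
    obtain ⟨hs', hm'⟩ := ih dp (by omega) hshp hprev
    have hj0 : m + S - 1 < n := by omega
    have hr1 := hm' (m + 1) (m + S - 1) (by omega) hj0 (Or.inl (by omega))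
    have hr2 := hm' m (m + S - 1 - 1) (by omega) (by omega) (Or.inl (by omega))
    rw [pvFillCell xs pre S hS _ m hr1 hr2]
    refine ⟨pvShp_mset hs' _ _ _, ?_⟩
    intro i j hij hjn hcond
    by_cases hcell : i = m ∧ j = m + S - 1
    · obtain ⟨h3, h4⟩ := hcell; subst h3; subst h4
      exact pvMget_mset_self hs' (by omega) hj0 _
    · have hne : i ≠ m ∨ j ≠ m + S - 1 := by tauto
      rw [pvMget_mset_ne hne]
      apply hm' i j hij hjn
      rcases hcond with h | h
      · exact Or.inl h
      · rcases Nat.lt_or_ge i m with hlt | hge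
        · exact Or.inr ⟨h.1, hlt⟩
        · exfalso
          have h5 : i = m := by omega
          have h6 : j = m + S - 1 := by omega
          exact hcell ⟨h5, h6⟩

-- A's whole fill loop
theorem pvFill_spec (xs pre : List Int) (n : Nat) :
    ∀ (m : Nat) (dp : List (List (Int × String))), m ≤ n - 1 → pvShp n dp →
    (∀ i, i < n → pvMget dp i i = pvSol xs pre i i) →
    pvShp n ((List.range' 2 m).foldl (fun dp length =>
        (List.range (n - length + 1)).foldl (fun dp i =>
          let j := i + length - 1
          let total := pre.getD (j + 1) 0 - pre.getD i 0
          let l := total - (pvMget dp (i + 1) j).1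
          let r := total - (pvMget dp i (j - 1)).1
          if l ≥ r then pvMset dp i j (l, "L") else pvMset dp i j (r, "R")) dp) dp) ∧
    ∀ i j, i ≤ j → j < n → j + 1 - i ≤ m + 1 →
      pvMget ((List.range' 2 m).foldl (fun dp length =>
        (List.range (n - length + 1)).foldl (fun dp i =>
          let j := i + length - 1
          let total := pre.getD (j + 1) 0 - pre.getD i 0
          let l := total - (pvMget dp (i + 1) j).1
          let r := total - (pvMget dp i (j - 1)).1
          if l ≥ r then pvMset dp i j (l, "L") else pvMset dp i j (r, "R")) dp) dp) i j
      = pvSol xs pre i j := by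
  intro m
  induction m with
  | zero =>
    intro dp hm hshp hdiag
    simp only [List.range'_zero, List.foldl_nil]
    refine ⟨hshp, ?_⟩
    intro i j hij hjn hsp
    have h0 : i = j := by omega
    subst h0
    exact hdiag i hjn
  | succ m ih =>
    intro dp hm hshp hdiag
    rw [List.range'_concat, List.foldl_append, List.foldl_cons, List.foldl_nil]
    simp only [Nat.one_mul]
    obtain ⟨hs', hmm⟩ := ih dp (by omega) hshp hdiag
    have h2 := pvFillInner_spec xs pre n (2 + m) (by omega) (by omega)
      (n - (2 + m) + 1) _ (le_refl _) hs'
      (fun i j hij hjn hsp => hmm i j hij hjn (by omega))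
    refine ⟨h2.1, ?_⟩
    intro i j hij hjn hsp
    apply h2.2 i j hij hjn
    by_cases hx : j + 1 - i ≤ (2 + m) - 1
    · exact Or.inl hx
    · exact Or.inr ⟨by omega, by omega⟩

-- B side: the memo invariant — every entry is a correct pvSol value
def pvInv (xs pre : List Int) (memo : PySem.Dict (Int × Int) (Int × String)) : Prop :=
  ∀ (a b : Nat) (r : Int × String),
    memo.get? ((a : Int), (b : Int)) = some r → r = pvSol xs pre a b

theorem pvInv_empty (xs pre : List Int) : pvInv xs pre PySem.Dict.empty := by
  intro a b r h
  rw [PySem.Dict.get?_empty] at h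
  exact absurd h (by simp)

-- memoized solve is correct and preserves the invariant
theorem pvSolveB_correct (xs pre : List Int) :
    ∀ (d : Nat) (i j : Nat) (memo : PySem.Dict (Int × Int) (Int × String)),
      j - i ≤ d → i ≤ j → pvInv xs pre memo →
      (pvSolveB xs pre memo i j).1 = pvSol xs pre i j ∧
      pvInv xs pre (pvSolveB xs pre memo i j).2 := by
  intro d
  induction d with
  | zero =>
    intro i j memo hd hij hinv
    have h0 : i = j := by omega
    subst h0
    rw [pvSolveB, pvSol]
    simp [hinv]
  | succ d ih =>
    intro i j memo hd hij hinv
    by_cases he : i = j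
    · subst he
      rw [pvSolveB, pvSol]
      simp [hinv]
    · have hlt : i < j := by omega
      rw [pvSolveB]
      rw [if_neg he, dif_pos hlt]
      cases hmem : memo.get? ((i : Int), (j : Int)) with
      | some r =>
        simp only
        exact ⟨hinv i j r hmem, hinv⟩
      | none =>
        simp only
        obtain ⟨e1, v1⟩ := ih (i + 1) j memo (by omega) (by omega) hinv
        obtain ⟨e2, v2⟩ := ih i (j - 1) (pvSolveB xs pre memo (i + 1) j).2
          (by omega) (by omega) v1
        constructor
        · conv_rhs => rw [pvSol]
          rw [if_neg he, dif_pos hlt]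
          simp only
          rw [e1, e2]
        · intro a b r hr
          rw [PySem.Dict.get?_insert] at hr
          by_cases hk : ((a : Int), (b : Int)) = ((i : Int), (j : Int))
          · rw [if_pos hk] at hr
            obtain ⟨hk1, hk2⟩ := Prod.mk.injEq .. ▸ hk
            have ha : a = i := by exact_mod_cast hk1
            have hb : b = j := by exact_mod_cast hk2
            subst ha; subst hb
            conv_rhs => rw [pvSol]
            rw [if_neg he, dif_pos hlt]
            simp only
            rw [e1, e2] at hr
            cases hr
            rfl
          · rw [if_neg hk] at hr
            exact v2 a b r hr

-- the two tracebacks agree when table cells and memo both carry pvSol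
theorem pvTrace_eq (xs pre : List Int) (n : Nat) (dp : List (List (Int × String)))
    (hdp : ∀ i j, i ≤ j → j < n → j + 1 - i ≤ n → pvMget dp i j = pvSol xs pre i j) :
    ∀ d i j (memo : PySem.Dict (Int × Int) (Int × String)),
      j - i ≤ d → i ≤ j → j < n → pvInv xs pre memo →
      pvTraceA dp i j = pvTraceB xs pre memo i j := by
  intro d
  induction d with
  | zero =>
    intro i j memo hd hij hjn hinv
    have h0 : i = j := by omega
    subst h0
    rw [pvTraceA, pvTraceB]
    simp
  | succ d ih =>
    intro i j memo hd hij hjn hinv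
    by_cases he : i = j
    · subst he
      rw [pvTraceA, pvTraceB]
      simp
    · have hlt : i < j := by omega
      rw [pvTraceA, pvTraceB]
      rw [if_neg he, if_neg he, dif_pos hlt, dif_pos hlt]
      obtain ⟨hv, hinv'⟩ := pvSolveB_correct xs pre (j - i) i j memo (le_refl _)
        (by omega) hinv
      have hA : (pvMget dp i j).2 = (pvSol xs pre i j).2 := by
        rw [hdp i j (by omega) hjn (by omega)]
      simp only [hA, hv]
      split_ifs with hdir
      · rw [ih (i + 1) j _ (by omega) (by omega) hjn hinv']
      · rw [ih i (j - 1) _ (by omega) (by omega) (by omega) hinv']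

-- the two ports agree on every nonempty list
theorem pvMain (xs : List Int) (hne : xs ≠ []) :
    T_dp_with_traceback xs = T_dp_with_traceback_alt xs := by
  have hn1 : 0 < xs.length := List.length_pos_iff.mpr hne
  simp only [T_dp_with_traceback, T_dp_with_traceback_alt]
  rw [pvFold1_fst xs 0 [0] _, pvFold1_snd xs 0 [0] _]
  rw [show xs.foldl (fun ps x => ps ++ [PySem.List.pyGetD ps (-1) 0 + x]) [0]
      = pvPrefB xs from rfl]
  set n := xs.length with hn
  set pre := pvPrefB xs with hpre'
  have hshp0 : pvShp n (List.replicate n (List.replicate n ((0 : Int), ""))) := by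
    refine ⟨by simp, ?_⟩
    intro r hr
    rw [List.eq_of_mem_replicate hr]
    simp
  have hd := pvDiag xs n 0 (List.replicate n (List.replicate n ((0 : Int), "")))
    hshp0 (by omega)
  rw [Nat.cast_zero] at hd
  obtain ⟨hshp1, hdiag0⟩ := hd
  have hdiag : ∀ i, i < n →
      pvMget ((PySem.List.enumerate xs 0).foldl
        (fun dp (p : Int × Int) => pvMset dp p.1.toNat p.1.toNat (p.2, ""))
        (List.replicate n (List.replicate n ((0 : Int), "")))) i i
      = pvSol xs pre i i := by
    intro i hi
    have h := hdiag0 i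
    rw [if_pos ⟨Nat.zero_le i, by omega⟩] at h
    rw [h]
    conv_rhs => rw [pvSol]
    simp
  obtain ⟨hshp2, hcells⟩ := pvFill_spec xs pre n (n - 1) _ (le_refl _) hshp1 hdiag
  obtain ⟨hv0, hinv0⟩ := pvSolveB_correct xs pre (n - 1) 0 (n - 1)
    PySem.Dict.empty (le_refl _) (by omega) (pvInv_empty xs pre)
  simp only [Prod.mk.injEq]
  constructor
  · rw [hcells 0 (n - 1) (by omega) (by omega) (by omega), hv0]
  · exact pvTrace_eq xs pre n _
      (fun i j a b c => hcells i j a b (by omega))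
      (n - 1) 0 (n - 1) _ (by omega) (by omega) (by omega) hinv0

-- ===== VERDICT (by name: the statement is the Claim_ definition above) =====
theorem T_dp_with_traceback_spec : Claim_equal_T_dp_with_traceback := by
  intro segment_lengths _ hpre
  unfold Spec_T_dp_with_traceback
  exact pvMain segment_lengths hpre
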